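-- pv_equiv track=rewrite | github.com/dizys/nyu-ai-lab-2 | solving/dpll.py | collect_atoms
-- ===== SOURCE A (Python) =====
-- from typing import Dict, List, Tuple, Union, TypedDict
--
-- def collect_atoms(cnf_rep: List[List[Tuple[str, bool]]]) -> List[str]:
--     """
--     Collects all the atoms in the CNF representation.
--
--     :param cnf_rep: The CNF representation to collect atoms from.
--     :return: The list of atoms in the CNF representation.
--     """
--
--     atoms = []
--     for clause in cnf_rep:
--         for atom in clause:
--             if atom[0] not in atoms:
--                 atoms.append(atom[0])
--     atoms.sort()
--     return atoms
-- ===== SOURCE B (Python) =====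
-- def collect_atoms(cnf_rep):
--     """Flatten all atom names, sort, then one adjacent-dedup pass."""
--     names = [atom[0] for clause in cnf_rep for atom in clause]
--     names.sort()
--     atoms = []
--     prev = None
--     for name in names:
--         if prev is None or name != prev:
--             atoms.append(name)
--             prev = name
--     return atoms
-- ===== Notes on version B (the rewrite author's own statement) =====
-- stated objective: faster
-- what changed: Replaces the O(n^2) first-occurrence dedup (linear membership scan per atom) followed by sort with flatten-all, sort once, and a single adjacent-dedup pass over the sorted list.
import Mathlib
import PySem

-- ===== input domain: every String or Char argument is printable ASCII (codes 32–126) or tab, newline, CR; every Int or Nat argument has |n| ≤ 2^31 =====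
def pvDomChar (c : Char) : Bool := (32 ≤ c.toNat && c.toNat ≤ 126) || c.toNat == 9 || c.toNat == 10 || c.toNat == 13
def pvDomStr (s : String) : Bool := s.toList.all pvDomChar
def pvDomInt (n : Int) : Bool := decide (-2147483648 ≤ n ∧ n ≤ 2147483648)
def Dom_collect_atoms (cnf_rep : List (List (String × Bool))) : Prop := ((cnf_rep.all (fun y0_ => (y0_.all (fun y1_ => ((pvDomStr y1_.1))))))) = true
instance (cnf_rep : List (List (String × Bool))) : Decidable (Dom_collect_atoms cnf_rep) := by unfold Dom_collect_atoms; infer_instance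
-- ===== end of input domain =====

-- B replaces A's per-atom membership scan by flatten, one sort, one adjacent-dedup pass (alternative decomposition).

-- ===== PORT A =====
def collect_atoms (cnf_rep : List (List (String × Bool))) : List String :=
  let atoms := cnf_rep.foldl (fun atoms clause =>
    clause.foldl (fun atoms atom =>
      if atom.1 ∈ atoms then atoms else atoms ++ [atom.1]) atoms) []
  PySem.List.sorted atoms (fun x => x) false

-- ===== PORT B =====
def collect_atoms_alt (cnf_rep : List (List (String × Bool))) : List String :=
  let names := cnf_rep.foldl (fun acc clause => acc ++ clause.map (fun atom => atom.1)) []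
  let sortedNames := PySem.List.sorted names (fun x => x) false
  let st := sortedNames.foldl (fun (st : List String × Option String) name =>
      if st.2 = none ∨ st.2 ≠ some name then (st.1 ++ [name], some name) else st)
    ([], none)
  st.1

-- ===== PRECONDITION & SPEC =====
def Spec_collect_atoms (cnf_rep : List (List (String × Bool))) (out : List String) : Prop := out = collect_atoms_alt cnf_rep
instance (cnf_rep : List (List (String × Bool))) (out : List String) : Decidable (Spec_collect_atoms cnf_rep out) := by unfold Spec_collect_atoms; infer_instance

-- ===== CLAIM (what is proved, stated in full; the proofs are below) =====
def Claim_equal_collect_atoms : Prop := ∀ (cnf_rep : List (List (String × Bool))), Dom_collect_atoms cnf_rep → Spec_collect_atoms cnf_rep (collect_atoms cnf_rep)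

-- ===== LEMMAS AND PROOFS =====

-- A's dedup step
def pvStepA (atoms : List String) (a : String) : List String :=
  if a ∈ atoms then atoms else atoms ++ [a]

lemma pvStepA_fold_mem (l : List String) (acc : List String) (y : String) :
    y ∈ l.foldl pvStepA acc ↔ y ∈ acc ∨ y ∈ l := by
  induction l generalizing acc with
  | nil => simp
  | cons x xs ih =>
      simp only [List.foldl_cons, ih, pvStepA]
      split_ifs with h
      · constructor
        · rintro (h1 | h1)
          · exact Or.inl h1
          · exact Or.inr (List.mem_cons_of_mem _ h1)
        · rintro (h1 | h1)
          · exact Or.inl h1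
          · rcases List.mem_cons.mp h1 with rfl | h1
            · exact Or.inl h
            · exact Or.inr h1
      · simp only [List.mem_append, List.mem_cons]
        tauto

lemma pvStepA_fold_nodup (l : List String) (acc : List String) (h : acc.Nodup) :
    (l.foldl pvStepA acc).Nodup := by
  induction l generalizing acc with
  | nil => simpa using h
  | cons x xs ih =>
      simp only [List.foldl_cons, pvStepA]
      split_ifs with hm
      · exact ih acc h
      · exact ih _ (h.append (List.nodup_singleton x)
          (fun a ha hax => hm ((List.mem_singleton.mp hax) ▸ ha)))

-- B's adjacent-dedup, in recursive form
def pvDedup : List String → Option String → List String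
  | [], _ => []
  | x :: xs, p => if p = some x then pvDedup xs p else x :: pvDedup xs (some x)

def pvAfter : List String → Option String → Option String
  | [], p => p
  | x :: xs, _ => pvAfter xs (some x)

lemma pvFoldB_eq (l : List String) (acc : List String) (p : Option String) :
    l.foldl (fun (st : List String × Option String) name =>
      if st.2 = none ∨ st.2 ≠ some name then (st.1 ++ [name], some name) else st) (acc, p)
    = (acc ++ pvDedup l p, pvAfter l p) := by
  induction l generalizing acc p with
  | nil => simp [pvDedup, pvAfter]
  | cons x xs ih =>
      simp only [List.foldl_cons, pvDedup, pvAfter]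
      by_cases hp : p = some x
      · subst hp
        simp [ih]
      · have hc : p = none ∨ p ≠ some x := by
          cases p with
          | none => exact Or.inl rfl
          | some v => exact Or.inr hp
        rw [if_pos hc, if_neg hp, ih]
        simp

lemma pvDedup_props (l : List String) (p : Option String)
    (hs : l.Pairwise (· ≤ ·)) (hp : ∀ y ∈ l, ∀ v, p = some v → v ≤ y) :
    (pvDedup l p).Pairwise (· < ·) ∧ ∀ y, (y ∈ pvDedup l p ↔ y ∈ l ∧ p ≠ some y) := by
  induction l generalizing p with
  | nil => simp [pvDedup]
  | cons x xs ih =>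
      have hx : ∀ y ∈ xs, x ≤ y := fun y hy => (List.pairwise_cons.mp hs).1 y hy
      have hs' : xs.Pairwise (· ≤ ·) := (List.pairwise_cons.mp hs).2
      by_cases hpx : p = some x
      · subst hpx
        have ih' := ih (p := some x) hs' (fun y hy v hv => by
          injection hv with h; exact h ▸ hx y hy)
        have hred : pvDedup (x :: xs) (some x) = pvDedup xs (some x) := by
          simp [pvDedup]
        rw [hred]
        refine ⟨ih'.1, fun y => ?_⟩
        rw [(ih'.2 y)]
        constructor
        · rintro ⟨hy, hne⟩
          exact ⟨List.mem_cons_of_mem _ hy, hne⟩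
        · rintro ⟨hy, hne⟩
          rcases List.mem_cons.mp hy with rfl | hy
          · exact absurd rfl hne
          · exact ⟨hy, hne⟩
      · have ih' := ih (p := some x) hs' (fun y hy v hv => by
          injection hv with h; exact h ▸ hx y hy)
        have hred : pvDedup (x :: xs) p = x :: pvDedup xs (some x) := by
          simp [pvDedup, hpx]
        rw [hred]
        constructor
        · refine List.pairwise_cons.mpr ⟨fun y hy => ?_, ih'.1⟩
          have := (ih'.2 y).mp hy
          exact lt_of_le_of_ne (hx y this.1) (fun h => this.2 (by rw [h]))
        · intro y
          rw [List.mem_cons, (ih'.2 y)]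
          constructor
          · rintro (rfl | ⟨hy, hne⟩)
            · exact ⟨List.mem_cons_self, hpx⟩
            · refine ⟨List.mem_cons_of_mem _ hy, fun hpy => ?_⟩
              have h1 : y ≤ x := hp x List.mem_cons_self y hpy
              have h2 : x ≤ y := hx y hy
              exact hne (congrArg some (le_antisymm h2 h1))
          · rintro ⟨hy, hne⟩
            rcases List.mem_cons.mp hy with rfl | hy
            · exact Or.inl rfl
            · by_cases hxy : x = y
              · exact Or.inl hxy.symm
              · exact Or.inr ⟨hy, fun h => hxy (by injection h)⟩

-- flatten equals the nested fold shapes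
lemma pvFlat_eq (cnf : List (List (String × Bool))) (acc : List String) :
    cnf.foldl (fun acc clause => acc ++ clause.map (fun atom => atom.1)) acc
      = acc ++ (cnf.map (fun c => c.map (fun atom => atom.1))).flatten := by
  induction cnf generalizing acc with
  | nil => simp
  | cons c cs ih => simp [ih, List.append_assoc]

lemma pvNestedA_eq (cnf : List (List (String × Bool))) (acc : List String) :
    cnf.foldl (fun atoms clause =>
      clause.foldl (fun atoms atom =>
        if atom.1 ∈ atoms then atoms else atoms ++ [atom.1]) atoms) acc
      = ((cnf.map (fun c => c.map (fun atom => atom.1))).flatten).foldl pvStepA acc := by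
  induction cnf generalizing acc with
  | nil => simp
  | cons c cs ih =>
      simp only [List.map_cons, List.flatten_cons, List.foldl_append, List.foldl_cons]
      rw [ih]
      congr 1
      rw [List.foldl_map]
      simp [pvStepA]

-- ===== VERDICT (by name: the statement is the Claim_ definition above) =====
theorem collect_atoms_spec : Claim_equal_collect_atoms := by
  intro cnf _
  unfold Spec_collect_atoms collect_atoms collect_atoms_alt
  set flat := (cnf.map (fun c => c.map (fun atom => atom.1))).flatten with hflat
  have hA : cnf.foldl (fun atoms clause =>
      clause.foldl (fun atoms atom =>
        if atom.1 ∈ atoms then atoms else atoms ++ [atom.1]) atoms) []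
      = flat.foldl pvStepA [] := pvNestedA_eq cnf []
  have hN : cnf.foldl (fun acc clause => acc ++ clause.map (fun atom => atom.1)) [] = flat := by
    rw [pvFlat_eq]; rfl
  simp only [hA, hN, pvFoldB_eq, List.nil_append]
  -- both sides: sorted(A's dedup) vs adjacent-dedup of sorted flat
  have hsorted : (PySem.List.sorted flat (fun x => x) false).Pairwise (· ≤ ·) :=
    PySem.List.sorted_pairwise flat (fun x => x)
  have hd := pvDedup_props (PySem.List.sorted flat (fun x => x) false) none hsorted
    (by intro y _ v hv; cases hv)
  have hmemA : ∀ y, y ∈ flat.foldl pvStepA [] ↔ y ∈ flat := by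
    intro y; rw [pvStepA_fold_mem]; simp
  have hnodupA : (flat.foldl pvStepA []).Nodup := pvStepA_fold_nodup flat [] List.nodup_nil
  have hmemB : ∀ y, y ∈ pvDedup (PySem.List.sorted flat (fun x => x) false) none ↔ y ∈ flat := by
    intro y
    rw [(hd.2 y)]
    simp [PySem.List.mem_sorted]
  have hnodupB : (pvDedup (PySem.List.sorted flat (fun x => x) false) none).Nodup :=
    hd.1.imp (fun h => ne_of_lt h)
  have hperm : (pvDedup (PySem.List.sorted flat (fun x => x) false) none).Perm
      (flat.foldl pvStepA []) := by
    rw [List.perm_ext_iff_of_nodup hnodupB hnodupA]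
    intro y; rw [hmemB, hmemA]
  exact PySem.List.sorted_eq_of_perm_of_pairwise_lt _ _ _ hperm hd.1
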